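-- pv_equiv track=rewrite | github.com/PotapenkoEugene/BI_2019_Python | fastq_filter.py | trailing
-- ===== SOURCE A (Python) =====
-- def trailing(seq: str, qual: str, TRAILING):
--     if len(seq) == 0:
--         return ['', '']
--     qualityPhred = [ord(phredscore) - 33 for phredscore in qual]
--     for i in range(len(seq) - 1, -1, -1):
--         if qualityPhred[i] >= TRAILING:
--             break
--         elif i == 0:  # если и последний нукл не годится возвращаем пустую последовательность
--             return ['', '']
--     return [seq[:i + 1], qual[:i + 1]]
-- ===== SOURCE B (Python) =====
-- def trailing(seq, qual, TRAILING):
--     # characters whose Phred score is below the threshold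
--     bad = ''.join(c for c in qual if ord(c) - 33 < TRAILING)
--     kept = qual[:len(seq)].rstrip(bad)
--     return [seq[:len(kept)], qual[:len(kept)]]
-- ===== Notes on version B (the rewrite author's own statement) =====
-- stated objective: simpler
-- what changed: Replaces the explicit backward index loop with break/return and the i==0 special case by one rstrip of the bad-quality character set built in a single forward pass, then a common slice by the kept length.
import Mathlib
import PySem

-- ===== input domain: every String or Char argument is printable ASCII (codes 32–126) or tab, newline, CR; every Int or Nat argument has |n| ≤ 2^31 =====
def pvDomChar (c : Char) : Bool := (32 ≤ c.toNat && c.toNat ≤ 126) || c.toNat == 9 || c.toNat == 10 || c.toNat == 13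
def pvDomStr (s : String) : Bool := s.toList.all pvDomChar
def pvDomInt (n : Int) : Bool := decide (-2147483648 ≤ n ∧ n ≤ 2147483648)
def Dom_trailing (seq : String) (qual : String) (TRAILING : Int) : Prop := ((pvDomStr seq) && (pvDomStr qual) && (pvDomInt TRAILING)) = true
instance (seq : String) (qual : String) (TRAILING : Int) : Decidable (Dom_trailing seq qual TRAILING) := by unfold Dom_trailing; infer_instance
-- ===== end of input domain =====

-- B replaces A's backward index loop (with break and i==0 special case) by a
-- bad-character-set rstrip plus a common slice; objective: simpler.

-- ===== PORT A =====
-- for i in range(len(seq)-1, -1, -1): break at a good score returns `some i`;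
-- reaching i == 0 without a break returns `none` (A's early return of ['','']).
-- `pyGet? = none` is Python's IndexError (qual shorter than seq); excluded by Pre_.
def trailingLoopA (qp : List Int) (T : Int) : Nat → Option Nat
  | 0 =>
    match PySem.List.pyGet? qp ((0 : Nat) : Int) with
    | none => none
    | some q => if q ≥ T then some 0 else none
  | (i+1) =>
    match PySem.List.pyGet? qp (((i+1 : Nat) : Int)) with
    | none => none
    | some q => if q ≥ T then some (i+1) else trailingLoopA qp T i

def trailing (seq : String) (qual : String) (TRAILING : Int) : List String :=
  if seq.length = 0 then ["", ""]
  else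
    let qualityPhred := qual.toList.map (fun c => ((c.toNat : Int) - 33))
    match trailingLoopA qualityPhred TRAILING (seq.length - 1) with
    | none => ["", ""]
    | some i =>
      -- seq[:i+1] / qual[:i+1] with a nonnegative bound = take (i+1)
      [String.ofList (seq.toList.take (i+1)), String.ofList (qual.toList.take (i+1))]

-- ===== PORT B =====
def trailing_alt (seq : String) (qual : String) (TRAILING : Int) : List String :=
  let bad := qual.toList.filter (fun c => (c.toNat : Int) - 33 < TRAILING)
  -- qual[:len(seq)].rstrip(bad): hand port of str.rstrip(chars) — drop trailing
  -- characters contained in `bad` (rstrip('') strips nothing; exact)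
  let kept := ((qual.toList.take seq.length).reverse.dropWhile (fun c => bad.contains c)).reverse
  [String.ofList (seq.toList.take kept.length), String.ofList (qual.toList.take kept.length)]

-- ===== PRECONDITION & SPEC =====
-- A raises IndexError when seq is nonempty and qual is shorter than seq; Pre_ excludes exactly that.
def Pre_trailing (seq : String) (qual : String) (TRAILING : Int) : Prop :=
  seq.length = 0 ∨ seq.length ≤ qual.length
instance (seq : String) (qual : String) (TRAILING : Int) : Decidable (Pre_trailing seq qual TRAILING) := by unfold Pre_trailing; infer_instance

def pvWitness_trailing : String × String × Int := ("ACGT", "II!!", 20)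

def Spec_trailing (seq : String) (qual : String) (TRAILING : Int) (out : List String) : Prop := out = trailing_alt seq qual TRAILING
instance (seq : String) (qual : String) (TRAILING : Int) (out : List String) : Decidable (Spec_trailing seq qual TRAILING out) := by unfold Spec_trailing; infer_instance

-- ===== CLAIM (what is proved, stated in full; the proofs are below) =====
def Claim_equal_trailing : Prop := ∀ (seq : String) (qual : String) (TRAILING : Int), Dom_trailing seq qual TRAILING → Pre_trailing seq qual TRAILING → Spec_trailing seq qual TRAILING (trailing seq qual TRAILING)

-- ===== LEMMAS AND PROOFS =====

theorem dropWhile_congr_mem {α : Type} (p q : α → Bool) (l : List α)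
    (h : ∀ c ∈ l, p c = q c) : l.dropWhile p = l.dropWhile q := by
  induction l with
  | nil => rfl
  | cons x xs ih =>
    simp only [List.dropWhile_cons]
    rw [h x (List.mem_cons_self), ih (fun c hc => h c (List.mem_cons_of_mem _ hc))]

theorem loop_eq (l : List Char) (T : Int) (i : Nat) (h : i < l.length) :
    trailingLoopA (l.map (fun c => ((c.toNat : Int) - 33))) T i =
      (let r := (l.take (i+1)).reverse.dropWhile (fun c => decide ((c.toNat : Int) - 33 < T));
       if r.isEmpty then none else some (r.length - 1)) := by
  induction i with
  | zero =>
    have h0 : l[0]? = some l[0] := List.getElem?_eq_getElem h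
    simp only [trailingLoopA, PySem.List.pyGet?_natCast, List.getElem?_map, h0,
      Option.map_some]
    have ht : l.take 1 = [l[0]] := by
      rw [List.take_one]
      cases l with
      | nil => simp at h
      | cons a as => simp
    rw [ht]
    by_cases hb : (l[0].toNat : Int) - 33 ≥ T
    · simp [List.dropWhile_cons, hb, not_lt.mpr hb]
    · simp only [not_le] at hb
      simp [List.dropWhile_cons, hb]
  | succ j ih =>
    have hj : j < l.length := Nat.lt_of_succ_lt h
    have h0 : l[j+1]? = some l[j+1] := List.getElem?_eq_getElem h
    simp only [trailingLoopA, PySem.List.pyGet?_natCast, List.getElem?_map, h0,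
      Option.map_some]
    have ht : l.take (j+2) = l.take (j+1) ++ [l[j+1]] := by
      rw [List.take_succ, List.getElem?_eq_getElem h]; rfl
    rw [ht, List.reverse_append]
    by_cases hb : (l[j+1].toNat : Int) - 33 ≥ T
    · simp only [ge_iff_le, hb, if_true]
      have : ¬ ((l[j+1].toNat : Int) - 33 < T) := not_lt.mpr hb
      simp [List.dropWhile_cons, this, List.length_take, Nat.min_eq_left (Nat.le_of_lt h)]
    · simp only [ge_iff_le, hb, if_false]
      have hlt : (l[j+1].toNat : Int) - 33 < T := lt_of_not_ge hb
      rw [ih hj]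
      simp [List.dropWhile_cons, hlt]

theorem contains_filter_eq (qual : List Char) (T : Int) (c : Char) (hc : c ∈ qual) :
    ((qual.filter (fun c => decide ((c.toNat : Int) - 33 < T))).contains c)
      = decide ((c.toNat : Int) - 33 < T) := by
  by_cases hb : (c.toNat : Int) - 33 < T
  · simp [List.mem_filter, hc, hb]
  · simp [List.mem_filter, hc, hb]

-- ===== VERDICT (by name: the statement is the Claim_ definition above) =====
theorem trailing_spec : Claim_equal_trailing := by
  intro seq qual T _ hpre
  unfold Spec_trailing trailing trailing_alt
  by_cases hz : seq.length = 0
  · simp [hz]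
  · simp only [hz, if_false]
    have hn : seq.length ≤ qual.length := by
      rcases hpre with h | h
      · exact absurd h hz
      · simpa using h
    have hi : seq.length - 1 < qual.toList.length := by
      have : qual.toList.length = qual.length := by simp
      omega
    rw [loop_eq qual.toList T (seq.length - 1) hi]
    have hs1 : seq.length - 1 + 1 = seq.length := by omega
    rw [hs1]
    -- unify the two dropWhile predicates
    have hcong :
        ((qual.toList.take seq.length).reverse.dropWhile
          (fun c => ((qual.toList.filter (fun c => decide ((c.toNat : Int) - 33 < T))).contains c)))
        = ((qual.toList.take seq.length).reverse.dropWhile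
          (fun c => decide ((c.toNat : Int) - 33 < T))) := by
      apply dropWhile_congr_mem
      intro c hc
      have hm : c ∈ qual.toList := List.mem_of_mem_take (List.mem_reverse.mp hc)
      exact contains_filter_eq qual.toList T c hm
    rw [hcong]
    generalize ((qual.toList.take seq.length).reverse.dropWhile
      (fun c => decide ((c.toNat : Int) - 33 < T))) = r
    cases r with
    | nil => simp
    | cons a as => simp
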